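-- pv_equiv track=rewrite | github.com/whitemech/Plan4Past | benchmark/utils/triangletireworld.py | _locs_goal_order_zigzag
-- ===== SOURCE A (Python) =====
-- def _locs_goal_order_zigzag(nb_locs: int):
--     assert nb_locs >= 2
--     result = []
--     i = 1
--     j = 1
--     while i + j <= nb_locs + 1:
--         result.append(f"l{i}x{j}")
--         if i == j:
--             i += 1
--         elif i - j == 1:
--             j += 1
--     return result
-- ===== SOURCE B (Python) =====
-- def _locs_goal_order_zigzag(nb_locs: int):
--     assert nb_locs >= 2
--     return [
--         f"l{(k + 1) // 2}x{(k + 1) // 2}" if k % 2 == 1 else f"l{k // 2 + 1}x{k // 2}"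
--         for k in range(1, nb_locs + 1)
--     ]
-- ===== Notes on version B (the rewrite author's own statement) =====
-- stated objective: simpler
-- what changed: Replaced the two-counter (i,j) state machine with a single comprehension computing each location name directly from the index k by a closed-form parity formula.
import Mathlib
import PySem

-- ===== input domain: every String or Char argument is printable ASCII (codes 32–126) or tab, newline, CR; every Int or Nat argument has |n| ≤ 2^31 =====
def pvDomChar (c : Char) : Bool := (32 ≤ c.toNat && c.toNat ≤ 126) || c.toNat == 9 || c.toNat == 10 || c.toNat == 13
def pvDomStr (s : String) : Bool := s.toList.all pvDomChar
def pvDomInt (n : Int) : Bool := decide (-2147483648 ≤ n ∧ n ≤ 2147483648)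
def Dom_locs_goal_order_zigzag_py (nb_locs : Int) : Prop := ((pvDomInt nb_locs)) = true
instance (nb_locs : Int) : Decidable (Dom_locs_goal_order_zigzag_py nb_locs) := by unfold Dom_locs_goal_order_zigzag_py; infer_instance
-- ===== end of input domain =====

-- B replaces A's two-counter (i,j) state machine by a single comprehension with a
-- closed-form parity formula on the index k (objective: simpler). Pre_ excludes
-- nb_locs < 2, where A's assert raises.


-- ===== PORT A =====
-- A's while loop: each iteration i+j grows by 1 (the state always satisfies i=j or
-- i-j=1), so fuel nb_locs.toNat + 2 is never exhausted on admitted inputs; the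
-- loop body is transliterated branch for branch.
def pvZigLoop (nb_locs : Int) (fuel : Nat) (i j : Int) (result : List String) :
    List String :=
  match fuel with
  | 0 => result
  | f + 1 =>
    if i + j ≤ nb_locs + 1 then
      let result := result ++ ["l" ++ PySem.Int.toStr i ++ "x" ++ PySem.Int.toStr j]
      if i = j then pvZigLoop nb_locs f (i + 1) j result
      else if i - j = 1 then pvZigLoop nb_locs f i (j + 1) result
      else pvZigLoop nb_locs f i j result
    else result

def locs_goal_order_zigzag_py (nb_locs : Int) : List String :=
  pvZigLoop nb_locs (nb_locs.toNat + 2) 1 1 []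

-- ===== PORT B =====
def pvZigName (k : Int) : String :=
  if PySem.Int.mod k 2 = 1 then
    "l" ++ PySem.Int.toStr (PySem.Int.floordiv (k + 1) 2) ++ "x" ++
      PySem.Int.toStr (PySem.Int.floordiv (k + 1) 2)
  else
    "l" ++ PySem.Int.toStr (PySem.Int.floordiv k 2 + 1) ++ "x" ++
      PySem.Int.toStr (PySem.Int.floordiv k 2)

def locs_goal_order_zigzag_py_alt (nb_locs : Int) : List String :=
  (PySem.List.pyRange 1 (nb_locs + 1) 1).map pvZigName

-- ===== PRECONDITION & SPEC =====
-- A's assert raises AssertionError for nb_locs < 2; those inputs are excluded.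
def Pre_locs_goal_order_zigzag_py (nb_locs : Int) : Prop := 2 ≤ nb_locs
instance (nb_locs : Int) : Decidable (Pre_locs_goal_order_zigzag_py nb_locs) := by
  unfold Pre_locs_goal_order_zigzag_py; infer_instance
def pvWitness_locs_goal_order_zigzag_py : Int := (5)

def Spec_locs_goal_order_zigzag_py (nb_locs : Int) (out : List String) : Prop :=
  out = locs_goal_order_zigzag_py_alt nb_locs
instance (nb_locs : Int) (out : List String) :
    Decidable (Spec_locs_goal_order_zigzag_py nb_locs out) := by
  unfold Spec_locs_goal_order_zigzag_py; infer_instance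

-- ===== CLAIM (what is proved, stated in full; the proofs are below) =====
def Claim_equal_locs_goal_order_zigzag_py : Prop :=
  ∀ (nb_locs : Int), Dom_locs_goal_order_zigzag_py nb_locs →
    Pre_locs_goal_order_zigzag_py nb_locs →
    Spec_locs_goal_order_zigzag_py nb_locs (locs_goal_order_zigzag_py nb_locs)

-- ===== LEMMAS AND PROOFS =====

-- On the diagonal state (j, j) the emitted name is pvZigName (2j-1) …
lemma pvZigName_odd (j : Int) (_hj : 1 ≤ j) :
    pvZigName (2 * j - 1) =
      "l" ++ PySem.Int.toStr j ++ "x" ++ PySem.Int.toStr j := by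
  rw [pvZigName,
    PySem.Int.mod_eq_emod_of_pos (a := 2 * j - 1) (show (0:Int) < 2 by omega),
    PySem.Int.floordiv_eq_ediv_of_pos (a := 2 * j - 1 + 1) (show (0:Int) < 2 by omega)]
  rw [if_pos (by omega), show (2 * j - 1 + 1) / 2 = j by omega]

-- … and on the off-diagonal state (j+1, j) it is pvZigName (2j).
lemma pvZigName_even (j : Int) (_hj : 1 ≤ j) :
    pvZigName (2 * j) =
      "l" ++ PySem.Int.toStr (j + 1) ++ "x" ++ PySem.Int.toStr j := by
  rw [pvZigName,
    PySem.Int.mod_eq_emod_of_pos (a := 2 * j) (show (0:Int) < 2 by omega),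
    PySem.Int.floordiv_eq_ediv_of_pos (a := 2 * j) (show (0:Int) < 2 by omega)]
  rw [if_neg (by omega), show 2 * j / 2 = j by omega]

-- Loop invariant: from the diagonal state (j, j) the loop emits the names for
-- indices 2j-1 .. nb, and from the off-diagonal state (j+1, j) those for 2j .. nb.
lemma pvZigLoop_eq (fuel : Nat) :
    ∀ (nb j : Int) (acc : List String), 1 ≤ j →
      ((nb + 2 - 2 * j ≤ (fuel : Int) →
        pvZigLoop nb fuel j j acc =
          acc ++ (PySem.List.pyRange (2 * j - 1) (nb + 1) 1).map pvZigName) ∧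
       (nb + 1 - 2 * j ≤ (fuel : Int) →
        pvZigLoop nb fuel (j + 1) j acc =
          acc ++ (PySem.List.pyRange (2 * j) (nb + 1) 1).map pvZigName)) := by
  induction fuel with
  | zero =>
    intro nb j acc hj
    constructor
    · intro hf
      rw [PySem.List.pyRange_one_eq_nil (by omega)]
      simp [pvZigLoop]
    · intro hf
      rw [PySem.List.pyRange_one_eq_nil (by omega)]
      simp [pvZigLoop]
  | succ f ih =>
    intro nb j acc hj
    constructor
    · intro hf
      by_cases hle : j + j ≤ nb + 1
      · rw [PySem.List.pyRange_one_cons (by omega)]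
        show (if j + j ≤ nb + 1 then _ else _) = _
        rw [if_pos hle, if_pos rfl,
          (ih nb j (acc ++ ["l" ++ PySem.Int.toStr j ++ "x" ++ PySem.Int.toStr j])
            hj).2 (by omega),
          List.map_cons, pvZigName_odd j hj, show (2 * j - 1 + 1 : Int) = 2 * j by ring,
          List.append_assoc]
        rfl
      · rw [PySem.List.pyRange_one_eq_nil (by omega)]
        show (if j + j ≤ nb + 1 then _ else _) = _
        rw [if_neg hle]
        simp
    · intro hf
      by_cases hle : j + 1 + j ≤ nb + 1
      · rw [PySem.List.pyRange_one_cons (by omega)]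
        show (if j + 1 + j ≤ nb + 1 then _ else _) = _
        rw [if_pos hle, if_neg (by omega : ¬ j + 1 = j),
          if_pos (show j + 1 - j = 1 by ring),
          (ih nb (j + 1)
            (acc ++ ["l" ++ PySem.Int.toStr (j + 1) ++ "x" ++ PySem.Int.toStr j])
            (by omega)).1 (by omega),
          List.map_cons, pvZigName_even j hj,
          show (2 * (j + 1) - 1 : Int) = 2 * j + 1 by ring, List.append_assoc]
        rfl
      · rw [PySem.List.pyRange_one_eq_nil (by omega)]
        show (if j + 1 + j ≤ nb + 1 then _ else _) = _
        rw [if_neg hle]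
        simp

-- ===== VERDICT (by name: the statement is the Claim_ definition above) =====
theorem locs_goal_order_zigzag_py_spec : Claim_equal_locs_goal_order_zigzag_py := by
  intro nb _hdom hpre
  unfold Spec_locs_goal_order_zigzag_py locs_goal_order_zigzag_py
    locs_goal_order_zigzag_py_alt
  have h := (pvZigLoop_eq (nb.toNat + 2) nb 1 [] (le_refl 1)).1 (by push_cast; omega)
  simpa using h
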